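-- pv_equiv track=rewrite | github.com/daniel-reich/ubiquitous-fiesta | tjMNAEgkNvM5eyEqJ_24.py | unique_abbrev
-- ===== SOURCE A (Python) =====
-- def unique_abbrev(abbs, words):
--   required_count = len(abbs)
--   count = 0
--   for i in range(len(abbs)):
--     x = abbs[i]
--     y = len(x)
--     for eachword in words:
--       if x in eachword[0:y]:
--         count += 1
--   return required_count == count
-- ===== SOURCE B (Python) =====
-- def unique_abbrev(abbs, words):
--     # Build one prefix-count index over the words, then sum a single lookup per abbreviation.
--     pref_count = {}
--     for w in words:
--         for k in range(len(w) + 1):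
--             p = w[:k]
--             pref_count[p] = pref_count.get(p, 0) + 1
--     return sum(pref_count.get(a, 0) for a in abbs) == len(abbs)
-- ===== Notes on version B (the rewrite author's own statement) =====
-- stated objective: faster
-- what changed: B builds a prefix-count dictionary over the words once and answers each abbreviation with a single O(1) lookup, replacing A's scan of all words (with a slice-and-containment test) for every abbreviation.
import Mathlib
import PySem

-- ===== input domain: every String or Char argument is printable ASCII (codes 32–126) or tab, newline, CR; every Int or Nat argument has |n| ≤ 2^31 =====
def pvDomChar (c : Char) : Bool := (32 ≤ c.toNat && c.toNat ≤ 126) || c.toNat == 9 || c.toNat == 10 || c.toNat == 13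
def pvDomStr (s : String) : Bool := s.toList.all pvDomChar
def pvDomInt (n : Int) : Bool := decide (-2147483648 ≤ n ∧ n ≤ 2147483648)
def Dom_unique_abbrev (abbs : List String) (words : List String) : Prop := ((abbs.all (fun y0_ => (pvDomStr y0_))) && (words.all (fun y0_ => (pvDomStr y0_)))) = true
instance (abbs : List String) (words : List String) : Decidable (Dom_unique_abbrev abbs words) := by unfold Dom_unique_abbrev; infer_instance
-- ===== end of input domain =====

-- B replaces A's per-abbreviation scan of all words by a prefix-count dictionary built once over the
-- words, answered with one lookup per abbreviation (measured faster).


-- ===== PORT A =====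
def unique_abbrev (abbs : List String) (words : List String) : Bool :=
  let required_count : Int := abbs.length
  let count : Int :=
    (PySem.List.pyRange 0 (PySem.List.len abbs)).foldl (fun count i =>
      let x := PySem.List.pyGetD abbs i ""
      let y := PySem.Str.len x
      words.foldl (fun count eachword =>
        if PySem.Str.isIn x (PySem.Str.slice eachword (some 0) (some y)) then count + 1
        else count) count) 0
  decide (required_count = count)

-- ===== PORT B =====
-- pref_count: for every word, bump the counter of each of its prefixes w[:k], k = 0 .. len(w)
def prefCount (words : List String) : PySem.Dict String Int :=
  words.foldl (fun d w =>
    (PySem.List.pyRange 0 (PySem.Str.len w + 1)).foldl (fun d k =>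
      d.modify (PySem.Str.slice w none (some k)) 0 (· + 1)) d) PySem.Dict.empty

def unique_abbrev_alt (abbs : List String) (words : List String) : Bool :=
  let pref_count := prefCount words
  decide ((abbs.foldl (fun s a => s + pref_count.getD a 0) 0) = (abbs.length : Int))

-- ===== PRECONDITION & SPEC =====
def Spec_unique_abbrev (abbs : List String) (words : List String) (out : Bool) : Prop := out = unique_abbrev_alt abbs words
instance (abbs : List String) (words : List String) (out : Bool) : Decidable (Spec_unique_abbrev abbs words out) := by unfold Spec_unique_abbrev; infer_instance

-- ===== CLAIM (what is proved, stated in full; the proofs are below) =====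
def Claim_equal_unique_abbrev : Prop := ∀ (abbs : List String) (words : List String), Dom_unique_abbrev abbs words → Spec_unique_abbrev abbs words (unique_abbrev abbs words)

-- ===== LEMMAS AND PROOFS =====

-- the common predicate both counts reduce to: "a is a prefix of w"
def isPfx (a w : String) : Bool := decide (a.toList <+: w.toList)

theorem toList_slice_to (w : String) (k : Nat) :
    (PySem.Str.slice w none (some (k : Int))).toList = w.toList.take k := by
  simp [PySem.Str.toList_slice, PySem.Chars.slice, PySem.List.slice_to]

-- A's test `x in eachword[0:len(x)]` is exactly the prefix test
theorem isIn_slice_eq_isPfx (a w : String) :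
    PySem.Str.isIn a (PySem.Str.slice w (some 0) (some (PySem.Str.len a))) = isPfx a w := by
  have hsl : (PySem.Str.slice w (some 0) (some (PySem.Str.len a))).toList
      = w.toList.take a.toList.length := by
    rw [PySem.Str.len_eq]
    simp [PySem.Str.toList_slice, PySem.Chars.slice, PySem.List.slice_to]
  by_cases h : a.toList <+: w.toList
  · have hteq : a.toList = w.toList.take a.toList.length := List.prefix_iff_eq_take.mp h
    have ht : PySem.Str.isIn a (PySem.Str.slice w (some 0) (some (PySem.Str.len a))) = true := by
      rw [PySem.Str.isIn_iff_infix, hsl, ← hteq]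
    rw [ht]; simp [isPfx, h]
  · have hf : PySem.Str.isIn a (PySem.Str.slice w (some 0) (some (PySem.Str.len a))) = false := by
      rw [← Bool.not_eq_true, PySem.Str.isIn_iff_infix, hsl]
      intro hinf
      have hle : (w.toList.take a.toList.length).length ≤ a.toList.length := by
        simp [List.length_take]
      have heq : a.toList = w.toList.take a.toList.length :=
        List.IsInfix.eq_of_length hinf (le_antisymm hinf.length_le hle)
      exact h (List.prefix_iff_eq_take.mpr heq)
    rw [hf]; simp [isPfx, h]

-- membership in the list of prefixes of w
theorem mem_prefix_list (a w : String) :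
    (a ∈ (List.range (w.toList.length + 1)).map
        (fun k : Nat => PySem.Str.slice w none (some (k : Int)))) ↔ a.toList <+: w.toList := by
  constructor
  · rintro hm
    rcases List.mem_map.mp hm with ⟨k, hk, hfk⟩
    have : a.toList = w.toList.take k := by rw [← hfk, toList_slice_to]
    exact this ▸ List.take_prefix k w.toList
  · intro h
    refine List.mem_map.mpr ⟨a.toList.length, ?_, ?_⟩
    · exact List.mem_range.mpr (Nat.lt_succ_of_le h.length_le)
    · apply String.ext
      rw [toList_slice_to]
      exact (List.prefix_iff_eq_take.mp h).symm

-- the prefix list of w has no duplicates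
theorem nodup_prefix_list (w : String) :
    ((List.range (w.toList.length + 1)).map
        (fun k : Nat => PySem.Str.slice w none (some (k : Int)))).Nodup := by
  refine List.Nodup.map_on ?_ (List.nodup_range)
  intro k1 h1 k2 h2 heq
  have h1' : k1 ≤ w.toList.length := Nat.lt_succ_iff.mp (List.mem_range.mp h1)
  have h2' : k2 ≤ w.toList.length := Nat.lt_succ_iff.mp (List.mem_range.mp h2)
  have hlen : (w.toList.take k1).length = (w.toList.take k2).length := by
    rw [← toList_slice_to, ← toList_slice_to, heq]
  rw [List.length_take, List.length_take] at hlen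
  omega

-- count of a in the prefix list of w
theorem count_prefix_list (a w : String) :
    ((List.range (w.toList.length + 1)).map
        (fun k : Nat => PySem.Str.slice w none (some (k : Int)))).count a
      = if isPfx a w then 1 else 0 := by
  by_cases h : a.toList <+: w.toList
  · rw [if_pos (by simp [isPfx, h])]
    exact List.count_eq_one_of_mem (nodup_prefix_list w) ((mem_prefix_list a w).mpr h)
  · rw [if_neg (by simp [isPfx, h])]
    exact List.count_eq_zero_of_not_mem (fun hm => h ((mem_prefix_list a w).mp hm))

-- B's dictionary counts, for each abbreviation, the words it is a prefix of
theorem getD_prefCount_aux (a : String) (ws : List String) :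
    ∀ d : PySem.Dict String Int,
      (ws.foldl (fun d w =>
        (PySem.List.pyRange 0 (PySem.Str.len w + 1)).foldl (fun d k =>
          d.modify (PySem.Str.slice w none (some k)) 0 (· + 1)) d) d).getD a 0
      = d.getD a 0 + (ws.countP (fun w => isPfx a w) : Int) := by
  induction ws with
  | nil => intro d; simp
  | cons w ws ih =>
    intro d
    rw [List.foldl_cons, ih]
    have hstep :
        ((PySem.List.pyRange 0 (PySem.Str.len w + 1)).foldl (fun d k =>
          d.modify (PySem.Str.slice w none (some k)) 0 (· + 1)) d).getD a 0
        = d.getD a 0 + (if isPfx a w then 1 else 0) := by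
      have hr : PySem.List.pyRange 0 (PySem.Str.len w + 1)
          = (List.range (w.toList.length + 1)).map (fun k : Nat => (k : Int)) := by
        rw [PySem.List.pyRange_one, PySem.Str.len_eq]
        simp
      rw [hr, List.foldl_map,
        ← List.foldl_map (f := fun k : Nat => PySem.Str.slice w none (some (k : Int)))
          (g := fun d x => PySem.Dict.modify d x 0 (· + 1)),
        PySem.Dict.getD_foldl_modify_add_one, count_prefix_list]
      split <;> simp
    rw [hstep, List.countP_cons]
    by_cases hp : isPfx a w
    · simp [hp]; ring
    · simp [hp]

-- A's nested loops compute the same total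
theorem unique_abbrev_eq (abbs words : List String) :
    unique_abbrev abbs words
      = decide ((abbs.length : Int)
          = (abbs.map (fun a => (words.countP (fun w => isPfx a w) : Int))).sum) := by
  unfold unique_abbrev
  rw [PySem.List.foldl_pyRange_zero_pyGetD abbs ""
    (fun count x => words.foldl (fun count eachword =>
      if PySem.Str.isIn x (PySem.Str.slice eachword (some 0) (some (PySem.Str.len x)))
      then count + 1 else count) count) 0]
  have hinner : ∀ (x : String) (c : Int),
      words.foldl (fun count eachword =>
        if PySem.Str.isIn x (PySem.Str.slice eachword (some 0) (some (PySem.Str.len x)))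
        then count + 1 else count) c
      = c + (words.countP (fun w => isPfx x w) : Int) := by
    intro x c
    rw [PySem.List.foldl_if_add_one]
    congr 2
    exact List.countP_congr (fun w _ => by rw [isIn_slice_eq_isPfx])
  simp only [hinner]
  rw [PySem.List.foldl_add abbs (fun a => (words.countP (fun w => isPfx a w) : Int)) 0]
  simp

theorem unique_abbrev_alt_eq (abbs words : List String) :
    unique_abbrev_alt abbs words
      = decide ((abbs.map (fun a => (words.countP (fun w => isPfx a w) : Int))).sum
          = (abbs.length : Int)) := by
  unfold unique_abbrev_alt
  have hgetD : ∀ a : String,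
      (prefCount words).getD a 0 = (words.countP (fun w => isPfx a w) : Int) := by
    intro a
    unfold prefCount
    rw [getD_prefCount_aux a words PySem.Dict.empty]
    simp [show (PySem.Dict.empty : PySem.Dict String Int).getD a 0 = 0 from rfl]
  simp only [hgetD]
  rw [PySem.List.foldl_add abbs (fun a => (words.countP (fun w => isPfx a w) : Int)) 0]
  simp

-- ===== VERDICT (by name: the statement is the Claim_ definition above) =====
theorem unique_abbrev_spec : Claim_equal_unique_abbrev := by
  intro abbs words _
  unfold Spec_unique_abbrev
  rw [unique_abbrev_eq, unique_abbrev_alt_eq]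
  simp [eq_comm]
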